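-- pv_equiv track=rewrite | github.com/tejeshwar-01/AI-OCR-Document-Verification | backend/utils/processor.py | guess_name_from_text
-- ===== SOURCE A (Python) =====
-- def guess_name_from_text(txt):
--     if not txt:
--         return ""
--     lines = [l.strip() for l in txt.splitlines() if l.strip()]
--     candidates = []
--     for ln in lines[:30]:
--         if any(c.isalpha() for c in ln) and 3 < len(ln) < 80:
--             low = ln.lower()
--             if any(skip in low for skip in ['dob', 'date of birth', 'male', 'female', 'government', 'aadhaar', 'uidai']):
--                 continue
--             candidates.append(ln)
--     for c in candidates:
--         if c.isupper() and len(c.split()) <= 6: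
--             return c
--     return candidates[0] if candidates else ""
-- ===== SOURCE B (Python) =====
-- SKIPS = ['dob', 'date of birth', 'male', 'female', 'government', 'aadhaar', 'uidai']
--
--
-- def _is_candidate(ln):
--     return (any(c.isalpha() for c in ln) and 3 < len(ln) < 80
--             and not any(sk in ln.lower() for sk in SKIPS))
--
--
-- def _is_upper_name(ln):
--     return ln.isupper() and len(ln.split()) <= 6
--
--
-- def guess_name_from_text(txt):
--     # Single pass over the raw lines: strip/filter, the candidate filter and
--     # both selections are fused into one loop with a break on the first
--     # uppercase candidate; no intermediate lists are built.
--     if not txt: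
--         return ""
--     first_cand = None
--     seen = 0
--     for raw in txt.splitlines():
--         if seen >= 30:
--             break
--         ln = raw.strip()
--         if not ln:
--             continue
--         seen += 1
--         if _is_candidate(ln):
--             if _is_upper_name(ln):
--                 return ln
--             if first_cand is None:
--                 first_cand = ln
--     return first_cand if first_cand is not None else ""
-- ===== Notes on version B (the rewrite author's own statement) =====
-- stated objective: alternative
-- what changed: Replaced build-stripped-list + build-candidates-list + two sequential scans with a single streaming loop over the raw lines that strips, filters, counts the first 30 nonempty lines and tracks first_candidate/first_uppercase with an early break, building no intermediate lists.
import Mathlib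
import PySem

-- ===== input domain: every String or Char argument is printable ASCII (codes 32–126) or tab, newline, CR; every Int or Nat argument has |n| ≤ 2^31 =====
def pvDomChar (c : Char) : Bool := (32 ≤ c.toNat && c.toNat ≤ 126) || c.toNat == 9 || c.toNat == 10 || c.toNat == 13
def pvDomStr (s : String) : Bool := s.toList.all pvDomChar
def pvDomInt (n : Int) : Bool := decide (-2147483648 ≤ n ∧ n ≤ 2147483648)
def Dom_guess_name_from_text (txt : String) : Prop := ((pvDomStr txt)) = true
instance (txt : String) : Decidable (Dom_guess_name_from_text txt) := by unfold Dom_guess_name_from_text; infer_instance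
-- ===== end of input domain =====

-- B fuses A's strip/filter pass, candidate-list build and two scans into one streaming loop
-- with an early return (objective: alternative decomposition; same asymptotic cost).


-- shared module constant
def pvSkips : List String := ["dob", "date of birth", "male", "female", "government", "aadhaar", "uidai"]

-- hand port of str.isupper, exact on the ASCII domain (cased characters = latin letters):
-- at least one cased character and no lowercase character
def pyStrIsupper (s : String) : Bool :=
  (s.toList.any (fun c => PySem.Chars.islower c || PySem.Chars.isupper c)) &&
  !(s.toList.any (fun c => PySem.Chars.islower c))

-- the candidate filter (A inlines it in its first loop; Source B's _is_candidate)
def pvIsCand (ln : String) : Bool :=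
  (ln.toList.any PySem.Chars.isalpha) && (3 < PySem.Str.len ln && PySem.Str.len ln < 80) &&
  !(pvSkips.any (fun sk => PySem.Str.isIn sk (PySem.Str.lower ln)))

-- the uppercase-name test (A inlines it in its second loop; Source B's _is_upper_name)
def pvIsUpper (c : String) : Bool :=
  pyStrIsupper c && (PySem.Str.split₀ c).length ≤ 6

-- ===== PORT A =====
-- A's second loop: return the first uppercase candidate
def pvFindUpper : List String → Option String
  | [] => none
  | c :: rest => if pvIsUpper c then some c else pvFindUpper rest

def guess_name_from_text (txt : String) : String :=
  if txt = "" then ""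
  else
    let lines := ((PySem.Str.splitlines txt).filter (fun l => PySem.Str.strip l ≠ "")).map PySem.Str.strip
    let candidates := (PySem.List.slice lines none (some 30)).foldl
      (fun acc ln => if pvIsCand ln then acc ++ [ln] else acc) []
    match pvFindUpper candidates with
    | some c => c
    | none => match candidates with
              | [] => ""
              | c :: _ => c

-- ===== PORT B =====
-- B's single loop: budget check, strip, skip empties, fused filter and selection with early return
def pvLoopB : List String → Nat → Option String → String
  | [], _, firstCand => firstCand.getD ""
  | raw :: rest, seen, firstCand =>
    if 30 ≤ seen then firstCand.getD ""
    else
      let ln := PySem.Str.strip raw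
      if ln = "" then pvLoopB rest seen firstCand
      else if pvIsCand ln then
        if pvIsUpper ln then ln
        else pvLoopB rest (seen + 1) (match firstCand with | some c => some c | none => some ln)
      else pvLoopB rest (seen + 1) firstCand

def guess_name_from_text_alt (txt : String) : String :=
  if txt = "" then "" else pvLoopB (PySem.Str.splitlines txt) 0 none

-- ===== PRECONDITION & SPEC =====
def Spec_guess_name_from_text (txt : String) (out : String) : Prop := out = guess_name_from_text_alt txt
instance (txt : String) (out : String) : Decidable (Spec_guess_name_from_text txt out) := by unfold Spec_guess_name_from_text; infer_instance

-- ===== CLAIM (what is proved, stated in full; the proofs are below) =====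
def Claim_equal_guess_name_from_text : Prop := ∀ (txt : String), Dom_guess_name_from_text txt → Spec_guess_name_from_text txt (guess_name_from_text txt)

-- ===== LEMMAS AND PROOFS =====

-- the stripped nonempty lines, as A computes them
def pvLines (raws : List String) : List String :=
  (raws.filter (fun l => PySem.Str.strip l ≠ "")).map PySem.Str.strip

-- A's selection, as a function of the candidate list and the first candidate recorded so far
def pvCore (cands : List String) (firstCand : Option String) : String :=
  match pvFindUpper cands with
  | some c => c
  | none => match firstCand with
            | some c => c
            | none => match cands with
                      | [] => ""
                      | c :: _ => c

theorem pvLines_cons (raw : String) (rest : List String) :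
    pvLines (raw :: rest) =
      if PySem.Str.strip raw = "" then pvLines rest
      else PySem.Str.strip raw :: pvLines rest := by
  by_cases h : PySem.Str.strip raw = "" <;> simp [pvLines, h]

theorem pvLoopB_core (raws : List String) (seen : Nat) (fc : Option String) :
    pvLoopB raws seen fc = pvCore (((pvLines raws).take (30 - seen)).filter pvIsCand) fc := by
  induction raws generalizing seen fc with
  | nil =>
    simp only [pvLines, List.filter_nil, List.map_nil, List.take_nil]
    cases fc <;> rfl
  | cons raw rest ih =>
    rw [pvLines_cons]
    by_cases h30 : 30 ≤ seen
    · have h0 : 30 - seen = 0 := by omega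
      have hL : pvLoopB (raw :: rest) seen fc = fc.getD "" := by
        simp [pvLoopB, h30]
      rw [hL, h0]
      cases fc <;> rfl
    · by_cases hne : PySem.Str.strip raw = ""
      · simp only [hne, if_true]
        have hL : pvLoopB (raw :: rest) seen fc = pvLoopB rest seen fc := by
          simp [pvLoopB, h30, hne]
        rw [hL, ih]
      · have htake : (PySem.Str.strip raw :: pvLines rest).take (30 - seen) =
            PySem.Str.strip raw :: (pvLines rest).take (30 - (seen + 1)) := by
          have h : 30 - seen = (30 - (seen + 1)) + 1 := by omega
          rw [h, List.take_succ_cons]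
        simp only [hne, reduceIte, htake, List.filter_cons]
        by_cases hc : pvIsCand (PySem.Str.strip raw)
        · by_cases hu : pvIsUpper (PySem.Str.strip raw)
          · have hL : pvLoopB (raw :: rest) seen fc = PySem.Str.strip raw := by
              simp [pvLoopB, h30, hne, hc, hu]
            rw [hL]
            simp [pvCore, pvFindUpper, hc, hu]
          · have hL : pvLoopB (raw :: rest) seen fc =
                pvLoopB rest (seen + 1)
                  (match fc with | some c => some c | none => some (PySem.Str.strip raw)) := by
              simp [pvLoopB, h30, hne, hc, hu]
            rw [hL, ih]
            simp only [hc, reduceIte, pvCore, pvFindUpper, hu]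
            cases hfu : pvFindUpper (((pvLines rest).take (30 - (seen + 1))).filter pvIsCand) with
            | some c => cases fc <;> simp
            | none => cases fc <;> simp
        · have hL : pvLoopB (raw :: rest) seen fc = pvLoopB rest (seen + 1) fc := by
            simp [pvLoopB, h30, hne, hc]
          rw [hL, ih]
          simp [hc]

-- ===== VERDICT (by name: the statement is the Claim_ definition above) =====
theorem guess_name_from_text_spec : Claim_equal_guess_name_from_text := by
  intro txt _
  unfold Spec_guess_name_from_text guess_name_from_text guess_name_from_text_alt
  by_cases h : txt = ""
  · simp [h]
  · simp only [if_neg h]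
    rw [pvLoopB_core]
    rw [PySem.List.slice_to _ (by norm_num)]
    simp only [PySem.List.foldl_append_if pvIsCand (fun ln => ln), List.nil_append, List.map_id_fun']
    have hlines : ((PySem.Str.splitlines txt).filter (fun l => PySem.Str.strip l ≠ "")).map PySem.Str.strip
        = pvLines (PySem.Str.splitlines txt) := rfl
    rw [hlines]
    norm_num [pvCore]
    rfl
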